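-- pv_equiv track=rewrite | github.com/jkalleberg/DV-TrioTrain | triotrain/helpers/helper_func.py | process_phase
-- ===== SOURCE A (Python) =====
-- def process_phase(txt: str):
--     """
--     Handle any special characters and only use '_' as a separator.
--
--     Input: 'A,Quick brown-fox jumped-over-the   lazy-dog'
--     Output: 'A_Quick_brown_fox_jumped_over_the_lazy_dog'
--     """
--     special_chars = "!#$%^&*()"
--     for special_char in special_chars:
--         txt = txt.replace(special_char, "")
--     standardize_seps = " -,"
--     for sep in standardize_seps:
--         txt = txt.replace(sep, "_")
--     return txt
-- ===== SOURCE B (Python) =====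
-- def process_phase(txt: str):
--     """Single explicit pass over the characters instead of 12 full-string replace passes."""
--     out = []
--     for ch in txt:
--         if ch in "!#$%^&*()":
--             continue
--         if ch in " -,":
--             out.append("_")
--         else:
--             out.append(ch)
--     return "".join(out)
-- ===== Notes on version B (the rewrite author's own statement) =====
-- stated objective: alternative
-- what changed: Replaces twelve sequential full-string str.replace passes with a single explicit pass over the characters that drops special characters and maps separator characters to an underscore.
import Mathlib
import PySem

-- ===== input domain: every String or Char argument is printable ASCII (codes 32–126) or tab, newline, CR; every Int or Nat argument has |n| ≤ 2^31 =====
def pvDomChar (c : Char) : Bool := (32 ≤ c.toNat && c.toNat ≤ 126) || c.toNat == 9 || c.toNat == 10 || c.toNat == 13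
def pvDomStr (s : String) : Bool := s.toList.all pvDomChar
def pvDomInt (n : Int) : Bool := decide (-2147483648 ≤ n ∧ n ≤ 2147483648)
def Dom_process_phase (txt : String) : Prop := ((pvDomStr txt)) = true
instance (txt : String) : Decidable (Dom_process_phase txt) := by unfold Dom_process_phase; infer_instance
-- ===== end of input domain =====

-- B replaces A's twelve sequential full-string replace passes by one explicit per-character pass (alternative decomposition, same asymptotic cost).

-- ===== PORT A =====
-- for special_char in "!#$%^&*()": txt = txt.replace(special_char, "")
-- for sep in " -,": txt = txt.replace(sep, "_")
def process_phase (txt : String) : String :=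
  let txt := ("!#$%^&*()".toList).foldl
    (fun t c => PySem.Str.replace t (String.mk [c]) "") txt
  let txt := (" -,".toList).foldl
    (fun t c => PySem.Str.replace t (String.mk [c]) "_") txt
  txt

-- ===== PORT B =====
-- out = []; for ch in txt: skip specials / append '_' for separators / append ch; ''.join(out)
def process_phase_alt (txt : String) : String :=
  let out := txt.toList.foldl
    (fun acc ch =>
      if ("!#$%^&*()".toList).contains ch then acc
      else if (" -,".toList).contains ch then acc ++ ['_']
      else acc ++ [ch]) []
  String.mk out

-- ===== PRECONDITION & SPEC =====
def Spec_process_phase (txt : String) (out : String) : Prop := out = process_phase_alt txt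
instance (txt : String) (out : String) : Decidable (Spec_process_phase txt out) := by unfold Spec_process_phase; infer_instance

-- ===== CLAIM (what is proved, stated in full; the proofs are below) =====
def Claim_equal_process_phase : Prop := ∀ (txt : String), Dom_process_phase txt → Spec_process_phase txt (process_phase txt)

-- ===== LEMMAS AND PROOFS =====

-- replace with a single-character pattern acts characterwise
theorem replace_go_single (c : Char) (new : List Char) :
    ∀ (l acc : List Char),
      PySem.Chars.replace.go [c] new l.length l acc
        = acc.reverse ++ l.flatMap (fun x => if x = c then new else [x]) := by
  intro l
  induction l with
  | nil => intro acc; simp [PySem.Chars.replace.go]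
  | cons h t ih =>
    intro acc
    show PySem.Chars.replace.go [c] new (t.length + 1) (h :: t) acc = _
    rw [PySem.Chars.replace.go]
    by_cases hc : h = c
    · subst hc
      simp [List.isPrefixOf, ih]
    · have : [c].isPrefixOf (h :: t) = false := by
        simp [List.isPrefixOf]; intro hcontra; exact hc hcontra.symm
      simp [this, ih, hc]

theorem replace_single (l : List Char) (c : Char) (new : List Char) :
    PySem.Chars.replace l [c] new
      = l.flatMap (fun x => if x = c then new else [x]) := by
  rw [PySem.Chars.replace]
  simp [replace_go_single c new l []]

theorem str_replace_single (s : String) (c : Char) (n : String) :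
    (PySem.Str.replace s (String.mk [c]) n).toList
      = s.toList.flatMap (fun x => if x = c then n.toList else [x]) := by
  rw [PySem.Str.toList_replace]
  have h1 : (String.mk [c]).toList = [c] := Eq.symm (String.ofList_eq.mp rfl)
  rw [h1]
  exact replace_single _ c _

theorem flatMap_drop (c : Char) (l : List Char) :
    l.flatMap (fun x => if x = c then ([] : List Char) else [x])
      = l.filter (fun x => !(x == c)) := by
  induction l with
  | nil => rfl
  | cons h t ih =>
    by_cases hc : h = c
    · subst hc; simp [ih]
    · have : (h == c) = false := by simp [hc]
      simp [hc, this, ih]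

theorem flatMap_subst (c d : Char) (l : List Char) :
    l.flatMap (fun x => if x = c then [d] else [x])
      = l.map (fun x => if x = c then d else x) := by
  induction l with
  | nil => rfl
  | cons h t ih =>
    by_cases hc : h = c
    · subst hc; simp [ih]
    · simp [hc, ih]

-- phase 1: folding single-char replaces with "" is a filter
theorem phase1 (cs : List Char) :
    ∀ (s : String),
      (cs.foldl (fun t c => PySem.Str.replace t (String.mk [c]) "") s).toList
        = s.toList.filter (fun x => !cs.contains x) := by
  induction cs with
  | nil => intro s; simp
  | cons c cs ih =>
    intro s
    rw [List.foldl_cons, ih, str_replace_single]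
    have h0 : ("" : String).toList = ([] : List Char) := rfl
    rw [h0, flatMap_drop, List.filter_filter]
    apply List.filter_congr
    intro x _
    by_cases hx : x = c
    · subst hx; simp
    · have : (x == c) = false := by simp [hx]
      simp [this, hx]

-- phase 2: folding single-char replaces with "_" is a map ('_' is not in cs)
theorem phase2 (cs : List Char) (h_ : ¬ cs.contains '_') :
    ∀ (s : String),
      (cs.foldl (fun t c => PySem.Str.replace t (String.mk [c]) "_") s).toList
        = s.toList.map (fun x => if cs.contains x then '_' else x) := by
  induction cs with
  | nil => intro s; simp
  | cons c cs ih =>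
    intro s
    have h1 : ¬ cs.contains '_' := by
      simp only [List.contains_cons, Bool.or_eq_true] at h_
      intro hmem; exact h_ (Or.inr hmem)
    rw [List.foldl_cons, ih h1, str_replace_single]
    have h0 : ("_" : String).toList = ['_'] := rfl
    rw [h0, flatMap_subst, List.map_map]
    apply List.map_congr_left
    intro x _
    by_cases hx : x = c
    · subst hx
      have hund : cs.contains '_' = false := by
        cases hb : cs.contains '_' with
        | false => rfl
        | true => exact absurd hb h1
      simp
    · simp [hx]

-- B's fold is a filter-then-map
theorem alt_chars (txt : String) :
    (process_phase_alt txt).toList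
      = (txt.toList.filter (fun x => !("!#$%^&*()".toList).contains x)).map
          (fun x => if (" -,".toList).contains x then '_' else x) := by
  show (String.mk (txt.toList.foldl _ [])).toList = _
  have key : ∀ (l acc : List Char),
      l.foldl (fun acc ch =>
        if ("!#$%^&*()".toList).contains ch then acc
        else if (" -,".toList).contains ch then acc ++ ['_']
        else acc ++ [ch]) acc
      = acc ++ (l.filter (fun x => !("!#$%^&*()".toList).contains x)).map
          (fun x => if (" -,".toList).contains x then '_' else x) := by
    intro l
    induction l with
    | nil => intro acc; simp
    | cons h t iht =>
      intro acc
      by_cases hs : ("!#$%^&*()".toList).contains h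
      · rw [List.foldl_cons]
        simp only [hs, if_true, List.filter_cons, Bool.not_true, Bool.false_eq_true, if_false]
        exact iht acc
      · have hs' : ("!#$%^&*()".toList).contains h = false := by
          cases hb : ("!#$%^&*()".toList).contains h with
          | false => rfl
          | true => exact absurd hb hs
        by_cases hp : (" -,".toList).contains h
        · simp only [List.foldl_cons, List.filter_cons, hs', hp, Bool.not_false,
            Bool.false_eq_true, if_false, if_true, List.map_cons]
          rw [iht, List.append_assoc]
          simp
        · have hp' : (" -,".toList).contains h = false := by
            cases hb : (" -,".toList).contains h with
            | false => rfl
            | true => exact absurd hb hp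
          simp only [List.foldl_cons, List.filter_cons, hs', hp', Bool.not_false,
            Bool.false_eq_true, if_false]
          rw [iht, List.append_assoc]
          simp only [List.singleton_append, List.map_cons, hp', Bool.false_eq_true,
            if_false, if_pos trivial]
  rw [key txt.toList [], List.nil_append]
  exact Eq.symm (String.ofList_eq.mp rfl)

-- ===== VERDICT (by name: the statement is the Claim_ definition above) =====
theorem process_phase_spec : Claim_equal_process_phase := by
  intro txt _
  show process_phase txt = process_phase_alt txt
  rw [← String.toList_inj, alt_chars]
  unfold process_phase
  rw [phase2 (" -,".toList) (by decide), phase1]
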